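-- pv_equiv track=rewrite | github.com/bjohnson1-stellar/QMS | projects/procore_io.py | _resolve_stage
-- ===== SOURCE A (Python) =====
-- from typing import Any, Dict, List, Optional, Tuple
--
-- STAGE_PRIORITY = [
--     "Archive",
--     "Warranty",
--     "Proposal",
--     "Pre-Construction",
--     "Construction and Bidding",
--     "Course of Construction",
-- ]
--
-- def _resolve_stage(stages: List[str]) -> str:
--     """Pick the most advanced stage from a list using STAGE_PRIORITY."""
--     best_idx = -1
--     best_stage = "Proposal"
--     for s in stages:
--         try:
--             idx = STAGE_PRIORITY.index(s)
--         except ValueError: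
--             idx = -1
--         if idx > best_idx:
--             best_idx = idx
--             best_stage = s
--     return best_stage
-- ===== SOURCE B (Python) =====
-- from typing import List
--
-- STAGE_PRIORITY = [
--     "Archive",
--     "Warranty",
--     "Proposal",
--     "Pre-Construction",
--     "Construction and Bidding",
--     "Course of Construction",
-- ]
--
-- def _resolve_stage(stages: List[str]) -> str:
--     """Pick the most advanced stage from a list using STAGE_PRIORITY."""
--     present = set(stages)
--     for stage in reversed(STAGE_PRIORITY):
--         if stage in present:
--             return stage
--     return "Proposal"
-- ===== Notes on version B (the rewrite author's own statement) =====
-- stated objective: idiomatic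
-- what changed: Instead of scanning `stages` while tracking the maximum STAGE_PRIORITY index and the corresponding string (calling STAGE_PRIORITY.index on every element), B builds a set of the present stages once and scans the fixed priority list from highest to lowest, early-returning the first priority stage that is present (else "Proposal").
import Mathlib
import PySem

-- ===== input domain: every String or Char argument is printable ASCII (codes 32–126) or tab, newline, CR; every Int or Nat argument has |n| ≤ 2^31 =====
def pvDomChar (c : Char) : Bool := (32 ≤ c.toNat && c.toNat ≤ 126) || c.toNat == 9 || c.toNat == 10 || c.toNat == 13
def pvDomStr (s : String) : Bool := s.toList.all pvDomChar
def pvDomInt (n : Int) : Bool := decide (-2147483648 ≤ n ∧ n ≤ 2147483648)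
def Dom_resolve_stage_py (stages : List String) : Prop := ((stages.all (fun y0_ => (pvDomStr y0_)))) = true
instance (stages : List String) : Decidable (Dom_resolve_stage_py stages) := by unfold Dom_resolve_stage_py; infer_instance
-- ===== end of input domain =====

-- B replaces A's max-index tracking scan of `stages` by a set of the present stages and an
-- early-returning scan of the fixed priority list from highest to lowest priority (idiomatic).

-- ===== PORT A =====
def pvStagePriority : List String :=
  ["Archive", "Warranty", "Proposal", "Pre-Construction",
   "Construction and Bidding", "Course of Construction"]

-- try: idx = STAGE_PRIORITY.index(s); except ValueError: idx = -1
def pvIdxOf (s : String) : Int :=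
  match PySem.List.index? pvStagePriority s with
  | some k => (k : Int)
  | none => -1

-- loop body: if idx > best_idx: best_idx, best_stage = idx, s
def pvStepA (st : Int × String) (s : String) : Int × String :=
  let idx := pvIdxOf s
  if idx > st.1 then (idx, s) else st

def resolve_stage_py (stages : List String) : String :=
  (stages.foldl pvStepA (-1, "Proposal")).2

-- ===== PORT B =====
-- for stage in reversed(STAGE_PRIORITY): if stage in present: return stage
def pvScanRev (present : PySem.Set String) : List String → String
  | [] => "Proposal"
  | p :: ps => if PySem.Set.contains present p then p else pvScanRev present ps

def resolve_stage_py_alt (stages : List String) : String :=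
  pvScanRev (PySem.Set.ofList stages) pvStagePriority.reverse

-- ===== PRECONDITION & SPEC =====
def Spec_resolve_stage_py (stages : List String) (out : String) : Prop := out = resolve_stage_py_alt stages
instance (stages : List String) (out : String) : Decidable (Spec_resolve_stage_py stages out) := by unfold Spec_resolve_stage_py; infer_instance

-- ===== CLAIM (what is proved, stated in full; the proofs are below) =====
def Claim_equal_resolve_stage_py : Prop := ∀ (stages : List String), Dom_resolve_stage_py stages → Spec_resolve_stage_py stages (resolve_stage_py stages)

-- ===== LEMMAS AND PROOFS =====

-- the stage named by a priority index (pvOut (-1) = "Proposal", A's initial best_stage)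
def pvOut (m : Int) : String :=
  if m = 0 then "Archive" else if m = 1 then "Warranty" else if m = 3 then "Pre-Construction"
  else if m = 4 then "Construction and Bidding" else if m = 5 then "Course of Construction"
  else "Proposal"

-- the running maximum of pvIdxOf over stages, seeded at b (A's best_idx)
def pvMaxFrom (b : Int) (stages : List String) : Int :=
  stages.foldl (fun m s => if pvIdxOf s > m then pvIdxOf s else m) b

lemma pvIdxOf_eq (s : String) :
    pvIdxOf s =
      if s = "Archive" then 0 else if s = "Warranty" then 1 else if s = "Proposal" then 2
      else if s = "Pre-Construction" then 3 else if s = "Construction and Bidding" then 4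
      else if s = "Course of Construction" then 5 else -1 := by
  simp only [pvIdxOf, pvStagePriority, PySem.List.index?_eq_idxOf?, List.idxOf?,
    List.findIdx?_cons]
  split_ifs <;> simp_all

lemma pvIdxOf_bounds (s : String) : -1 ≤ pvIdxOf s ∧ pvIdxOf s ≤ 5 := by
  rw [pvIdxOf_eq]; split_ifs <;> omega

lemma pvIdxOf_out (s : String) (h : 0 ≤ pvIdxOf s) : s = pvOut (pvIdxOf s) := by
  rw [pvIdxOf_eq] at h ⊢
  split_ifs at h ⊢ <;> first | omega | simp_all [pvOut]

lemma pvMaxFrom_cons (b : Int) (x : String) (xs : List String) :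
    pvMaxFrom b (x :: xs) = pvMaxFrom (if pvIdxOf x > b then pvIdxOf x else b) xs := rfl

lemma pvMaxFrom_le_init (b : Int) (stages : List String) : b ≤ pvMaxFrom b stages := by
  induction stages generalizing b with
  | nil => exact le_refl b
  | cons x xs ih =>
    rw [pvMaxFrom_cons]
    exact le_trans (by split <;> omega) (ih _)

lemma pvMaxFrom_ge (b : Int) (stages : List String) (s : String) (hs : s ∈ stages) :
    pvIdxOf s ≤ pvMaxFrom b stages := by
  induction stages generalizing b with
  | nil => cases hs
  | cons x xs ih =>
    rw [pvMaxFrom_cons]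
    rcases List.mem_cons.mp hs with h | h
    · subst h
      exact le_trans (by split <;> omega) (pvMaxFrom_le_init _ _)
    · exact ih _ h

lemma pvMaxFrom_attain (b : Int) (stages : List String) :
    pvMaxFrom b stages = b ∨ ∃ s ∈ stages, pvMaxFrom b stages = pvIdxOf s := by
  induction stages generalizing b with
  | nil => exact Or.inl rfl
  | cons x xs ih =>
    rw [pvMaxFrom_cons]
    rcases ih (if pvIdxOf x > b then pvIdxOf x else b) with h | ⟨s, hs, h⟩
    · by_cases hgt : pvIdxOf x > b
      · exact Or.inr ⟨x, List.mem_cons_self, by rw [h, if_pos hgt]⟩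
      · exact Or.inl (by rw [h, if_neg hgt])
    · exact Or.inr ⟨s, List.mem_cons_of_mem _ hs, h⟩

lemma pvA_loop (stages : List String) (b : Int) (hb1 : -1 ≤ b) (hb2 : b ≤ 5) :
    (stages.foldl pvStepA (b, pvOut b)).2 = pvOut (pvMaxFrom b stages) := by
  induction stages generalizing b with
  | nil => rfl
  | cons x xs ih =>
    rw [List.foldl_cons, pvMaxFrom_cons]
    by_cases hgt : pvIdxOf x > b
    · have hx : x = pvOut (pvIdxOf x) := pvIdxOf_out x (by omega)
      have hstep : pvStepA (b, pvOut b) x = (pvIdxOf x, pvOut (pvIdxOf x)) := by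
        simp [pvStepA, hgt, ← hx]
      rw [hstep, if_pos hgt]
      exact ih _ (pvIdxOf_bounds x).1 (pvIdxOf_bounds x).2
    · have hstep : pvStepA (b, pvOut b) x = (b, pvOut b) := by
        simp [pvStepA, hgt]
      rw [hstep, if_neg hgt]
      exact ih _ hb1 hb2

lemma pvMem_iff (stages : List String) (p : String) :
    PySem.Set.contains (PySem.Set.ofList stages) p = true ↔ p ∈ stages := by
  rw [PySem.Set.contains_iff, PySem.Set.mem_ofList]

lemma pvB_eq_out (stages : List String) :
    resolve_stage_py_alt stages = pvOut (pvMaxFrom (-1) stages) := by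
  have hrev : pvStagePriority.reverse =
      ["Course of Construction", "Construction and Bidding", "Pre-Construction",
       "Proposal", "Warranty", "Archive"] := rfl
  have hub : ∀ s ∈ stages, pvIdxOf s ≤ pvMaxFrom (-1) stages := pvMaxFrom_ge (-1) stages
  have hlo : -1 ≤ pvMaxFrom (-1) stages := pvMaxFrom_le_init _ _
  have hhi : pvMaxFrom (-1) stages ≤ 5 := by
    rcases pvMaxFrom_attain (-1) stages with h | ⟨s, _, h⟩
    · omega
    · rw [h]; exact (pvIdxOf_bounds s).2
  -- the value attained, if ≥ 0, is a priority stage present in `stages`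
  have hattain : 0 ≤ pvMaxFrom (-1) stages →
      pvOut (pvMaxFrom (-1) stages) ∈ stages ∧
      pvIdxOf (pvOut (pvMaxFrom (-1) stages)) = pvMaxFrom (-1) stages := by
    intro h0
    rcases pvMaxFrom_attain (-1) stages with h | ⟨s, hs, h⟩
    · omega
    · rw [h]
      have := pvIdxOf_out s (by omega)
      exact ⟨this ▸ hs, by rw [← this, ← h]⟩
  unfold resolve_stage_py_alt
  rw [hrev]
  simp only [pvScanRev]
  have i0 : pvIdxOf "Archive" = 0 := by decide
  have i1 : pvIdxOf "Warranty" = 1 := by decide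
  have i2 : pvIdxOf "Proposal" = 2 := by decide
  have i3 : pvIdxOf "Pre-Construction" = 3 := by decide
  have i4 : pvIdxOf "Construction and Bidding" = 4 := by decide
  have i5 : pvIdxOf "Course of Construction" = 5 := by decide
  generalize hgen : pvMaxFrom (-1) stages = m at hub hlo hhi hattain ⊢
  simp only [pvMem_iff]
  interval_cases m
  · have n0 : "Archive" ∉ stages := by intro h; have t := hub _ h; rw [i0] at t; omega
    have n1 : "Warranty" ∉ stages := by intro h; have t := hub _ h; rw [i1] at t; omega
    have n2 : "Proposal" ∉ stages := by intro h; have t := hub _ h; rw [i2] at t; omega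
    have n3 : "Pre-Construction" ∉ stages := by intro h; have t := hub _ h; rw [i3] at t; omega
    have n4 : "Construction and Bidding" ∉ stages := by intro h; have t := hub _ h; rw [i4] at t; omega
    have n5 : "Course of Construction" ∉ stages := by intro h; have t := hub _ h; rw [i5] at t; omega
    simp [pvOut, n0, n1, n2, n3, n4, n5]
  · have n1 : "Warranty" ∉ stages := by intro h; have t := hub _ h; rw [i1] at t; omega
    have n2 : "Proposal" ∉ stages := by intro h; have t := hub _ h; rw [i2] at t; omega
    have n3 : "Pre-Construction" ∉ stages := by intro h; have t := hub _ h; rw [i3] at t; omega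
    have n4 : "Construction and Bidding" ∉ stages := by intro h; have t := hub _ h; rw [i4] at t; omega
    have n5 : "Course of Construction" ∉ stages := by intro h; have t := hub _ h; rw [i5] at t; omega
    obtain ⟨hmem, -⟩ := hattain (by omega)
    norm_num [pvOut] at hmem
    simp [pvOut, n1, n2, n3, n4, n5, hmem]
  · have n2 : "Proposal" ∉ stages := by intro h; have t := hub _ h; rw [i2] at t; omega
    have n3 : "Pre-Construction" ∉ stages := by intro h; have t := hub _ h; rw [i3] at t; omega
    have n4 : "Construction and Bidding" ∉ stages := by intro h; have t := hub _ h; rw [i4] at t; omega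
    have n5 : "Course of Construction" ∉ stages := by intro h; have t := hub _ h; rw [i5] at t; omega
    obtain ⟨hmem, -⟩ := hattain (by omega)
    norm_num [pvOut] at hmem
    simp [pvOut, n2, n3, n4, n5, hmem]
  · have n3 : "Pre-Construction" ∉ stages := by intro h; have t := hub _ h; rw [i3] at t; omega
    have n4 : "Construction and Bidding" ∉ stages := by intro h; have t := hub _ h; rw [i4] at t; omega
    have n5 : "Course of Construction" ∉ stages := by intro h; have t := hub _ h; rw [i5] at t; omega
    obtain ⟨hmem, -⟩ := hattain (by omega)
    norm_num [pvOut] at hmem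
    simp [pvOut, n3, n4, n5, hmem]
  · have n4 : "Construction and Bidding" ∉ stages := by intro h; have t := hub _ h; rw [i4] at t; omega
    have n5 : "Course of Construction" ∉ stages := by intro h; have t := hub _ h; rw [i5] at t; omega
    obtain ⟨hmem, -⟩ := hattain (by omega)
    norm_num [pvOut] at hmem
    simp [pvOut, n4, n5, hmem]
  · have n5 : "Course of Construction" ∉ stages := by intro h; have t := hub _ h; rw [i5] at t; omega
    obtain ⟨hmem, -⟩ := hattain (by omega)
    norm_num [pvOut] at hmem
    simp [pvOut, n5, hmem]
  · obtain ⟨hmem, -⟩ := hattain (by omega)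
    norm_num [pvOut] at hmem
    simp [pvOut, hmem]

theorem resolve_stage_py_spec : Claim_equal_resolve_stage_py := by
  intro stages _
  unfold Spec_resolve_stage_py resolve_stage_py
  rw [pvB_eq_out]
  exact pvA_loop stages (-1) (by omega) (by omega)
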